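-- pv_equiv track=rewrite | github.com/1442916418/legendary-chainsaw | analysis/bookmarks.py | ArrayToJson
-- ===== SOURCE A (Python) =====
-- def ArrayToJson(list):
--     listLen = len(list)
--     if listLen == 0:
--         return
--
--     result = []
--
--     for i in range(0, listLen, 3):
--         urlIndex = i
--         iconIndex = i + 1
--         titleIndex = i + 2
--
--         if urlIndex >= listLen:
--             urlIndex = listLen - 1
--
--         if iconIndex >= listLen:
--             iconIndex = listLen - 1
--
--         if titleIndex >= listLen:
--             titleIndex = listLen - 1
--
--         item = {
--             'url': list[urlIndex],
--             'icon': list[iconIndex],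
--             'title': list[titleIndex]
--         }
--         result.append(item)
--
--     return result
-- ===== SOURCE B (Python) =====
-- def ArrayToJson(list):
--     if len(list) == 0:
--         return
--     padded = list + [list[-1]] * (-len(list) % 3)
--     return [{'url': padded[i], 'icon': padded[i + 1], 'title': padded[i + 2]}
--             for i in range(0, len(padded), 3)]
-- ===== Notes on version B (the rewrite author's own statement) =====
-- stated objective: simpler
-- what changed: B pads the list with copies of its last element up to a multiple of 3 and builds the dicts with a branch-free comprehension over full chunks, instead of A's loop with three per-index clamping branches.
import Mathlib
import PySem

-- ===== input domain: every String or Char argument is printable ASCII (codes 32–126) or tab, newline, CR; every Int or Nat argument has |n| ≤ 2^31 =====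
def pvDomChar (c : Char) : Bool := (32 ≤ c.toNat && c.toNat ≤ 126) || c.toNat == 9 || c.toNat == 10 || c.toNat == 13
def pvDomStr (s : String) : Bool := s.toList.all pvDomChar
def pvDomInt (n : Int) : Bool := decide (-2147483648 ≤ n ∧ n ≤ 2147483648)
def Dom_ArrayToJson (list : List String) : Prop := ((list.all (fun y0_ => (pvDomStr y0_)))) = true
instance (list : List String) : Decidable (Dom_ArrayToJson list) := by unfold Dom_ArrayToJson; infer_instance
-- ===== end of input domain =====

-- B pads the list with copies of its last element up to a multiple of 3 and builds the
-- dicts with a branch-free comprehension over full chunks (simpler than A's per-index clamps).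

-- ===== PORT A =====
def ArrayToJson (list : List String) : Option (List (List (String × String))) :=
  let listLen : Int := list.length
  if listLen = 0 then none
  else
    some ((PySem.List.pyRange 0 listLen 3).foldl (fun result i =>
      let urlIndex : Int := i
      let iconIndex : Int := i + 1
      let titleIndex : Int := i + 2
      let urlIndex := if listLen ≤ urlIndex then listLen - 1 else urlIndex
      let iconIndex := if listLen ≤ iconIndex then listLen - 1 else iconIndex
      let titleIndex := if listLen ≤ titleIndex then listLen - 1 else titleIndex
      result ++ [[("url", PySem.List.pyGetD list urlIndex ""),
                  ("icon", PySem.List.pyGetD list iconIndex ""),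
                  ("title", PySem.List.pyGetD list titleIndex "")]]) [])

-- ===== PORT B =====
def ArrayToJson_alt (list : List String) : Option (List (List (String × String))) :=
  if list.length = 0 then none
  else
    let padded := list ++ List.replicate (PySem.Int.mod (-(list.length : Int)) 3).toNat
                           (PySem.List.pyGetD list (-1) "")
    some ((PySem.List.pyRange 0 (padded.length : Int) 3).map (fun i =>
      [("url", PySem.List.pyGetD padded i ""),
       ("icon", PySem.List.pyGetD padded (i + 1) ""),
       ("title", PySem.List.pyGetD padded (i + 2) "")]))

-- ===== PRECONDITION & SPEC =====
def Spec_ArrayToJson (list : List String) (out : Option (List (List (String × String)))) : Prop := out = ArrayToJson_alt list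
instance (list : List String) (out : Option (List (List (String × String)))) : Decidable (Spec_ArrayToJson list out) := by unfold Spec_ArrayToJson; infer_instance

-- ===== CLAIM (what is proved, stated in full; the proofs are below) =====
def Claim_equal_ArrayToJson : Prop := ∀ (list : List String), Dom_ArrayToJson list → Spec_ArrayToJson list (ArrayToJson list)

-- ===== LEMMAS AND PROOFS =====

-- Indexing the padded list agrees with A's index clamping: inside the original list it is
-- the same element, in the padding it is the last element.
lemma pad_get (list : List String) (h : list ≠ []) (p : Nat) (j : Int)
    (h0 : 0 ≤ j) (hj : j < (list.length : Int) + p) :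
    PySem.List.pyGetD (list ++ List.replicate p (PySem.List.pyGetD list (-1) "")) j "" =
      PySem.List.pyGetD list
        (if (list.length : Int) ≤ j then (list.length : Int) - 1 else j) "" := by
  have hlpos : 0 < list.length := List.length_pos_iff.mpr h
  have hlen : (list ++ List.replicate p (PySem.List.pyGetD list (-1) "")).length
      = list.length + p := by simp
  have hjlt : j < ((list ++ List.replicate p (PySem.List.pyGetD list (-1) "")).length : Int) := by
    omega
  rw [PySem.List.pyGetD_eq_getElem _ _ h0 hjlt]
  by_cases hge : (list.length : Int) ≤ j
  · rw [if_pos hge,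
        PySem.List.pyGetD_eq_getElem (i := (list.length : Int) - 1) list "" (by omega) (by omega)]
    rw [List.getElem_append_right (by omega), List.getElem_replicate,
        PySem.List.pyGetD_neg_one _ _ h, List.getLast_eq_getElem h]
    congr 1
    omega
  · rw [if_neg hge, PySem.List.pyGetD_eq_getElem (i := j) list "" h0 (by omega)]
    rw [List.getElem_append_left (by omega)]

lemma main_eq (list : List String) (h : list ≠ []) :
    ArrayToJson list = ArrayToJson_alt list := by
  have hlpos : 0 < list.length := List.length_pos_iff.mpr h
  have hne : (list.length : Int) ≠ 0 := by exact_mod_cast Nat.pos_iff_ne_zero.mp hlpos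
  have hne' : list.length ≠ 0 := Nat.pos_iff_ne_zero.mp hlpos
  simp only [ArrayToJson, ArrayToJson_alt, if_neg hne, if_neg hne']
  rw [PySem.List.foldl_append_singleton_eq_map, List.nil_append]
  set p : Int := PySem.Int.mod (-(list.length : Int)) 3 with hp
  have hpemod : p = (-(list.length : Int)) % 3 := PySem.Int.mod_eq_emod_of_pos (by norm_num)
  have hp0 : 0 ≤ p := by omega
  have hp2 : p < 3 := by omega
  have hdvd : (3 : Int) ∣ ((list.length : Int) + p) := by omega
  have hplen : ((list ++ List.replicate p.toNat (PySem.List.pyGetD list (-1) "")).length : Int)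
      = (list.length : Int) + p := by
    simp only [List.length_append, List.length_replicate]
    push_cast
    omega
  congr 1
  rw [hplen,
      PySem.List.pyRange_of_pos 0 ((list.length : Int)) (by norm_num),
      PySem.List.pyRange_of_pos 0 ((list.length : Int) + p) (by norm_num),
      if_pos (show (0 : Int) < list.length by omega),
      if_pos (show (0 : Int) < (list.length : Int) + p by omega)]
  have hcount : (((list.length : Int) + p - 0 + 3 - 1) / 3).toNat
      = (((list.length : Int) - 0 + 3 - 1) / 3).toNat := by omega
  rw [hcount, List.map_map, List.map_map]
  apply List.map_congr_left
  intro k hk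
  have hkc : 3 * (k : Int) + 2 < (list.length : Int) + p := by
    rw [List.mem_range] at hk
    omega
  have h3k : 3 * (k : Int) < (list.length : Int) := by omega
  simp only [Function.comp_apply, zero_add]
  rw [pad_get list h p.toNat (3 * (k : Int)) (by omega) (by omega),
      pad_get list h p.toNat (3 * (k : Int) + 1) (by omega) (by omega),
      pad_get list h p.toNat (3 * (k : Int) + 2) (by omega) (by omega)]

-- ===== VERDICT (by name: the statement is the Claim_ definition above) =====
theorem ArrayToJson_spec : Claim_equal_ArrayToJson := by
  intro list _
  unfold Spec_ArrayToJson
  rcases List.eq_nil_or_concat list with rfl | _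
  · rfl
  · exact main_eq list (by rintro rfl; simp_all)
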